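-- pv_equiv track=rewrite | github.com/Arsen1302/Code-copy-detector | TestData/solutions/problem_585_3.py | solution_585_3
-- ===== SOURCE A (Python) =====
-- def solution_585_3(s: str, k: int) -> str:
--     if k==1:
--         ans=s
--         for i in range(len(s)):
--             if ((s+s)[i:i+len(s)])<ans: ans=((s+s)[i:i+len(s)])
--         return ans
--     else:
--         return "".join(sorted(s))
-- ===== SOURCE B (Python) =====
-- def solution_585_3(s: str, k: int) -> str:
--     if k != 1:
--         return "".join(sorted(s))
--     if not s:
--         return s
--     n = len(s)
--     # column-wise candidate elimination: keep the set of start indices whose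
--     # rotation has the minimal prefix seen so far, one character column at a time
--     cand = list(range(n))
--     for p in range(n):
--         if len(cand) == 1:
--             break
--         col = [s[(i + p) % n] for i in cand]
--         m = min(col)
--         cand = [i for i, ch in zip(cand, col) if ch == m]
--     j = cand[0]
--     return s[j:] + s[:j]
-- ===== Notes on version B (the rewrite author's own statement) =====
-- stated objective: alternative
-- what changed: For k==1, B never enumerates whole rotations: it keeps the set of candidate start indices and eliminates them column by column (keep only indices whose rotation has the minimal character in the current column, stopping when one candidate is left), then builds the single winning rotation; A slices every rotation out of s+s and folds a running minimum.
import Mathlib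
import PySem

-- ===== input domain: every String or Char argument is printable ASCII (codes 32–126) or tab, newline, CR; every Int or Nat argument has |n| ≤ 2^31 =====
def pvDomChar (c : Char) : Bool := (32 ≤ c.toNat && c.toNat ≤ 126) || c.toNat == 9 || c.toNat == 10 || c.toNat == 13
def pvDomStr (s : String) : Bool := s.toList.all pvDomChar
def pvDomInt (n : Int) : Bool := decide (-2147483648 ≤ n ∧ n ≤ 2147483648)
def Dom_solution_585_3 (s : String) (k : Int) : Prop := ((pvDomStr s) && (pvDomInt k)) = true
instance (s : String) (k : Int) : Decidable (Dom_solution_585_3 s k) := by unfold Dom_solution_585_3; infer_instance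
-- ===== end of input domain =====

-- B replaces A's "build every rotation of s+s and keep the running minimum" by column-wise
-- candidate elimination over start indices (alternative algorithm, same worst-case cost).

-- ===== PORT A =====
def solution_585_3 (s : String) (k : Int) : String :=
  let cs := s.toList
  if k == 1 then
    let n : Int := cs.length
    String.ofList ((PySem.List.pyRange 0 n 1).foldl
      (fun ans i =>
        let cand := PySem.List.slice (cs ++ cs) (some i) (some (i + n))
        if cand < ans then cand else ans) cs)
  else
    String.ofList (PySem.List.sorted cs (fun c => c) false)

-- ===== PORT B =====
-- the refinement loop: 'for p in range(n): if len(cand)==1: break; col=…; m=min(col); cand=…'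
def pvRefine (cs : List Char) (n : Int) : List Int → List Int → List Int
  | [], cand => cand
  | p :: ps, cand =>
      if cand.length == 1 then cand
      else
        let col := cand.map (fun i => PySem.List.pyGetD cs (PySem.Int.mod (i + p) n) 'a')
        let m := (PySem.List.min? col (fun c => c)).getD 'a'
        pvRefine cs n ps (((cand.zip col).filter (fun ic => ic.2 == m)).map (fun ic => ic.1))

def solution_585_3_alt (s : String) (k : Int) : String :=
  let cs := s.toList
  if !(k == 1) then String.ofList (PySem.List.sorted cs (fun c => c) false)
  else if cs.length == 0 then String.ofList cs
  else
    let n : Int := cs.length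
    let cand := pvRefine cs n (PySem.List.pyRange 0 n 1) (PySem.List.pyRange 0 n 1)
    let j := PySem.List.pyGetD cand 0 0
    String.ofList (PySem.List.slice cs (some j) none ++ PySem.List.slice cs none (some j))

-- ===== PRECONDITION & SPEC =====
def Spec_solution_585_3 (s : String) (k : Int) (out : String) : Prop := out = solution_585_3_alt s k
instance (s : String) (k : Int) (out : String) : Decidable (Spec_solution_585_3 s k out) := by unfold Spec_solution_585_3; infer_instance

-- ===== CLAIM =====
def Claim_equal_solution_585_3 : Prop := ∀ (s : String) (k : Int), Dom_solution_585_3 s k → Spec_solution_585_3 s k (solution_585_3 s k)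

-- ===== LEMMAS AND PROOFS =====

-- the i-th left rotation of cs
def pvRots (cs : List Char) (i : Nat) : List Char := cs.drop i ++ cs.take i

-- the running-minimum combinator A's fold uses
def pvMin2 (a x : List Char) : List Char := if x < a then x else a

theorem pvRots_zero (cs : List Char) : pvRots cs 0 = cs := by
  simp [pvRots]

theorem pvRots_length (cs : List Char) (i : Nat) : (pvRots cs i).length = cs.length := by
  simp [pvRots]; omega

theorem pvSlice_doubled (cs : List Char) (i : Nat) (h : i ≤ cs.length) :
    PySem.List.slice (cs ++ cs) (some (i : Int)) (some ((i : Int) + (cs.length : Int))) =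
      pvRots cs i := by
  rw [PySem.List.slice_natCast_add (cs ++ cs) i cs.length]
  unfold pvRots
  rw [List.drop_append_of_le_length h, List.take_append]
  rw [List.take_of_length_le (by simp)]
  have hlen : cs.length - (List.drop i cs).length = i := by simp; omega
  rw [hlen]

-- A's fold is the running minimum over all rotations 0 .. n-1
theorem pvA_fold (cs : List Char) :
    (PySem.List.pyRange 0 (cs.length : Int) 1).foldl
      (fun ans i =>
        let cand := PySem.List.slice (cs ++ cs) (some i) (some (i + (cs.length : Int)))
        if cand < ans then cand else ans) cs
    = List.foldl pvMin2 cs ((List.range cs.length).map (pvRots cs)) := by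
  rw [PySem.List.pyRange_one, List.foldl_map, List.foldl_map]
  apply PySem.List.foldl_congr_mem
  intro acc x hx
  have hxl : x < cs.length := List.mem_range.mp hx
  simp only [zero_add, pvMin2]
  rw [pvSlice_doubled cs x (le_of_lt hxl)]

theorem pvMin2_eq_min (a x : List Char) : pvMin2 a x = min a x := by
  unfold pvMin2
  rcases le_or_gt a x with h | h
  · rw [if_neg (not_lt.mpr h), min_eq_left h]
  · rw [if_pos h, min_eq_right h.le]

-- equal-length lists that compare strictly on a prefix compare strictly
theorem pvTake_lt (p : Nat) : ∀ (x y : List Char), x.length = y.length →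
    x.take p < y.take p → x < y := by
  induction p with
  | zero => intro x y _ h; simp at h
  | succ q ih =>
    intro x y hlen h
    cases x with
    | nil => cases y with
      | nil => simp at h
      | cons b t => simp at hlen
    | cons a xt => cases y with
      | nil => simp at hlen
      | cons b yt =>
        simp only [List.take_succ_cons] at h
        rcases List.cons_lt_cons_iff.mp h with h1 | ⟨h1, h2⟩
        · exact List.cons_lt_cons_iff.mpr (Or.inl h1)
        · exact List.cons_lt_cons_iff.mpr (Or.inr ⟨h1, ih xt yt (by simpa using hlen) h2⟩)

theorem pvTake_succ (x : List Char) (p : Nat) (h : p < x.length) :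
    x.take (p + 1) = x.take p ++ [x[p]] := by
  rw [List.take_add_one, List.getElem?_eq_getElem h]
  rfl

-- the character of rotation i at column p
theorem pvRots_getElem (cs : List Char) (i p : Nat) (hi : i < cs.length) (hp : p < cs.length) :
    (pvRots cs i)[p]'(by rw [pvRots_length]; exact hp) =
      cs.getD ((i + p) % cs.length) 'a' := by
  unfold pvRots
  by_cases h : p < cs.length - i
  · have hmod : (i + p) % cs.length = i + p := Nat.mod_eq_of_lt (by omega)
    rw [List.getElem_append_left (by simpa using h)]
    rw [List.getElem_drop]
    rw [hmod, List.getD_eq_getElem _ _ (by omega)]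
  · have hmod : (i + p) % cs.length = i + p - cs.length := by
      rw [Nat.mod_eq_sub_mod (by omega)]
      exact Nat.mod_eq_of_lt (by omega)
    rw [List.getElem_append_right (by simp; omega)]
    rw [List.getElem_take]
    rw [hmod, List.getD_eq_getElem _ _ (by omega)]
    congr 1
    simp only [List.length_drop]
    omega

-- the zip/filter/map comprehension over parallel maps of the same index list
theorem pvZfm (g : Nat → Int) (f : Nat → Char) (m : Char) (l : List Nat) :
    (((l.map g).zip (l.map f)).filter (fun ic => ic.2 == m)).map (fun ic => ic.1)
    = (l.filter (fun i => f i == m)).map g := by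
  induction l with
  | nil => rfl
  | cons a t ih =>
    simp only [List.map_cons, List.zip_cons_cons, List.filter_cons]
    by_cases h : f a == m
    · simp [h, ih]
    · simp [h, ih]

-- the invariant of the refinement loop: after p columns, cand holds exactly the start
-- indices whose rotation has the (strictly) minimal length-p prefix
def pvInv (cs : List Char) (p : Nat) (l : List Nat) : Prop :=
  l ≠ [] ∧ (∀ i ∈ l, i < cs.length) ∧
  (∀ i ∈ l, ∀ j ∈ l, (pvRots cs i).take p = (pvRots cs j).take p) ∧
  (∀ i ∈ l, ∀ j, j < cs.length → j ∉ l → (pvRots cs i).take p < (pvRots cs j).take p)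

theorem pvRefine_correct (cs : List Char) :
    ∀ (d p : Nat) (l : List Nat), p + d = cs.length → pvInv cs p l →
    ∃ l', pvRefine cs (cs.length : Int) (PySem.List.pyRange (p : Int) (cs.length : Int) 1)
            (l.map (Nat.cast : Nat → Int)) = l'.map (Nat.cast : Nat → Int) ∧
          l' ≠ [] ∧ (∀ i ∈ l', i < cs.length) ∧
          (∀ i ∈ l', ∀ j, j < cs.length → pvRots cs i ≤ pvRots cs j) := by
  intro d
  induction d with
  | zero =>
    intro p l hpd hinv
    obtain ⟨hne, hlt, heq, hstrict⟩ := hinv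
    have hp : p = cs.length := by omega
    refine ⟨l, ?_, hne, hlt, ?_⟩
    · rw [PySem.List.pyRange_one_eq_nil (by exact_mod_cast le_of_eq hp.symm)]
      rfl
    · intro i hi j hj
      by_cases hjl : j ∈ l
      · have h := heq i hi j hjl
        rw [hp, List.take_of_length_le (le_of_eq (pvRots_length cs i)),
          List.take_of_length_le (le_of_eq (pvRots_length cs j))] at h
        exact le_of_eq h
      · have h := hstrict i hi j hj hjl
        rw [hp, List.take_of_length_le (le_of_eq (pvRots_length cs i)),
          List.take_of_length_le (le_of_eq (pvRots_length cs j))] at h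
        exact le_of_lt h
  | succ d ih =>
    intro p l hpd hinv
    obtain ⟨hne, hlt, heq, hstrict⟩ := hinv
    have hpn : p < cs.length := by omega
    rw [PySem.List.pyRange_one_cons (by exact_mod_cast hpn)]
    by_cases hlen1 : l.length = 1
    · refine ⟨l, ?_, hne, hlt, ?_⟩
      · simp only [pvRefine]
        rw [if_pos (by simp [hlen1])]
      · intro i hi j hj
        obtain ⟨x, hx⟩ := List.length_eq_one_iff.mp hlen1
        by_cases hjl : j ∈ l
        · subst hx
          simp only [List.mem_singleton] at hi hjl
          rw [hi, hjl]
        · exact le_of_lt (pvTake_lt p _ _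
            (by rw [pvRots_length, pvRots_length]) (hstrict i hi j hj hjl))
    · -- elimination step
      have hstep : pvRefine cs (cs.length : Int)
            ((p : Int) :: PySem.List.pyRange ((p : Int) + 1) (cs.length : Int) 1)
            (l.map (Nat.cast : Nat → Int))
          = pvRefine cs (cs.length : Int) (PySem.List.pyRange ((p : Int) + 1) (cs.length : Int) 1)
              ((((l.map (Nat.cast : Nat → Int)).zip
                  ((l.map (Nat.cast : Nat → Int)).map
                    (fun i => PySem.List.pyGetD cs (PySem.Int.mod (i + (p : Int)) (cs.length : Int)) 'a'))).filter
                  (fun ic => ic.2 ==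
                    ((PySem.List.min? ((l.map (Nat.cast : Nat → Int)).map
                      (fun i => PySem.List.pyGetD cs (PySem.Int.mod (i + (p : Int)) (cs.length : Int)) 'a'))
                      (fun c => c)).getD 'a'))).map (fun ic => ic.1)) := by
        simp only [pvRefine]
        rw [if_neg (by simp [hlen1])]
      rw [hstep]
      -- the column is the p-th character of each candidate rotation
      have hcol : (l.map (Nat.cast : Nat → Int)).map
            (fun i => PySem.List.pyGetD cs (PySem.Int.mod (i + (p : Int)) (cs.length : Int)) 'a')
          = l.map (fun i => cs.getD ((i + p) % cs.length) 'a') := by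
        rw [List.map_map]
        apply List.map_congr_left
        intro i _
        simp only [Function.comp_apply]
        have hc : ((i : Int) + (p : Int)) = (((i + p : Nat)) : Int) := by push_cast; ring
        rw [hc, PySem.Int.mod_natCast, PySem.List.pyGetD_natCast]
      set f : Nat → Char := fun i => cs.getD ((i + p) % cs.length) 'a' with hf
      rw [hcol]
      have hcolne : l.map f ≠ [] := by simp [hne]
      obtain ⟨m, hm⟩ : ∃ m, PySem.List.min? (l.map f) (fun c => c) = some m := by
        cases hmm : PySem.List.min? (l.map f) (fun c => c) with
        | none => exact absurd ((PySem.List.min?_eq_none_iff _ _).mp hmm) hcolne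
        | some m => exact ⟨m, rfl⟩
      rw [hm]
      simp only [Option.getD_some]
      rw [pvZfm (Nat.cast : Nat → Int) f m l]
      -- the surviving candidates
      set l₂ := l.filter (fun i => f i == m) with hl₂
      have hsub : ∀ i ∈ l₂, i ∈ l := fun i hi => List.mem_of_mem_filter hi
      have hval : ∀ i ∈ l₂, f i = m := by
        intro i hi
        have := List.of_mem_filter hi
        exact eq_of_beq this
      have hminm : ∀ i ∈ l, m ≤ f i := by
        intro i hi
        exact PySem.List.min?_isMin hm (f i) (List.mem_map.mpr ⟨i, hi, rfl⟩)
      -- the p-th character of rotation i is f i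
      have hchar : ∀ i, i < cs.length →
          (pvRots cs i).take (p + 1) = (pvRots cs i).take p ++ [f i] := by
        intro i hi
        rw [pvTake_succ _ _ (by rw [pvRots_length]; exact hpn)]
        rw [pvRots_getElem cs i p hi hpn]
      have hl₂ne : l₂ ≠ [] := by
        obtain ⟨i₁, hi₁, hfi₁⟩ := List.mem_map.mp (PySem.List.min?_mem hm)
        have : i₁ ∈ l₂ := List.mem_filter.mpr ⟨hi₁, by simp [hfi₁]⟩
        intro hcon; rw [hcon] at this; exact List.not_mem_nil this
      have hlt₂ : ∀ i ∈ l₂, i < cs.length := fun i hi => hlt i (hsub i hi)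
      have hinv' : pvInv cs (p + 1) l₂ := by
        refine ⟨hl₂ne, hlt₂, ?_, ?_⟩
        · intro i hi j hj
          rw [hchar i (hlt₂ i hi), hchar j (hlt₂ j hj), hval i hi, hval j hj,
            heq i (hsub i hi) j (hsub j hj)]
        · intro i hi j hj hjl₂
          by_cases hjl : j ∈ l
          · -- j survived to this round but has a bigger p-th character
            have hfj : m < f j := by
              have hne' : f j ≠ m := by
                intro hcon
                exact hjl₂ (List.mem_filter.mpr ⟨hjl, by simp [hcon]⟩)
              exact lt_of_le_of_ne (hminm j hjl) (Ne.symm hne')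
            rw [hchar i (hlt₂ i hi), hchar j hj, hval i hi,
              heq i (hsub i hi) j hjl]
            exact List.append_left_lt (List.cons_lt_cons_iff.mpr (Or.inl hfj))
          · -- j was already strictly bigger on the first p characters
            have h := hstrict i (hsub i hi) j hj hjl
            apply pvTake_lt p
            · rw [List.length_take, List.length_take, pvRots_length, pvRots_length]
            · rw [List.take_take, List.take_take]
              simpa [Nat.min_def] using h
      have hc1 : ((p : Int) + 1) = (((p + 1 : Nat)) : Int) := by push_cast; ring
      rw [hc1]
      exact ih (p + 1) l₂ (by omega) hinv'

-- A's running minimum equals any rotation that is a lower bound of all rotations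
theorem pvMin_fold_eq (cs : List Char) (i₀ : Nat) (h0 : 0 < cs.length) (hi : i₀ < cs.length)
    (hmin : ∀ j, j < cs.length → pvRots cs i₀ ≤ pvRots cs j) :
    List.foldl pvMin2 cs ((List.range cs.length).map (pvRots cs)) = pvRots cs i₀ := by
  have hfun : List.foldl pvMin2 cs ((List.range cs.length).map (pvRots cs))
      = List.foldl min cs ((List.range cs.length).map (pvRots cs)) := by
    apply PySem.List.foldl_congr_mem
    intro a x _
    exact pvMin2_eq_min a x
  rw [hfun]
  set t := (List.range cs.length).map (pvRots cs) with ht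
  have hv_mem : pvRots cs i₀ ∈ t := by
    rw [ht]; exact List.mem_map.mpr ⟨i₀, List.mem_range.mpr hi, rfl⟩
  apply le_antisymm
  · exact (PySem.List.foldl_min_le t cs).2 _ hv_mem
  · rcases PySem.List.foldl_min_mem t cs with h | h
    · rw [h]
      have := hmin 0 h0
      rwa [pvRots_zero] at this
    · rw [ht] at h
      rcases List.mem_map.mp h with ⟨j, hj, hje⟩
      rw [← hje]
      exact hmin j (List.mem_range.mp hj)

-- initial invariant: every start index is a candidate
theorem pvInv_init (cs : List Char) (h : cs ≠ []) : pvInv cs 0 (List.range cs.length) := by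
  refine ⟨by simpa [List.range_eq_nil] using h, fun i hi => List.mem_range.mp hi, ?_, ?_⟩
  · intro i _ j _; simp
  · intro i _ j hj hjl
    exact absurd (List.mem_range.mpr hj) hjl

-- the k == 1 branches agree
theorem pvMain (cs : List Char) :
    (PySem.List.pyRange 0 (cs.length : Int) 1).foldl
      (fun ans i =>
        let cand := PySem.List.slice (cs ++ cs) (some i) (some (i + (cs.length : Int)))
        if cand < ans then cand else ans) cs
    = if cs.length == 0 then cs
      else
        let j := PySem.List.pyGetD
          (pvRefine cs (cs.length : Int) (PySem.List.pyRange 0 (cs.length : Int) 1)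
            (PySem.List.pyRange 0 (cs.length : Int) 1)) 0 0
        PySem.List.slice cs (some j) none ++ PySem.List.slice cs none (some j) := by
  by_cases hnil : cs = []
  · subst hnil
    simp [PySem.List.pyRange_one_eq_nil]
  · have h0 : 0 < cs.length := List.length_pos_of_ne_nil hnil
    rw [if_neg (by simpa using Nat.pos_iff_ne_zero.mp h0)]
    obtain ⟨l', hrw, hne', hlt', hmin'⟩ :=
      pvRefine_correct cs cs.length 0 (List.range cs.length) (by omega) (pvInv_init cs hnil)
    simp only [Nat.cast_zero] at hrw
    rw [show List.map (Nat.cast : Nat → Int) (List.range cs.length)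
        = PySem.List.pyRange 0 (cs.length : Int) 1 from (PySem.List.pyRange_zero_nat cs.length).symm] at hrw
    cases l' with
    | nil => exact absurd rfl hne'
    | cons i₀ t =>
      simp only [hrw, List.map_cons, PySem.List.pyGetD_zero_cons]
      rw [PySem.List.slice_from_natCast, PySem.List.slice_to_natCast]
      rw [pvA_fold]
      exact pvMin_fold_eq cs i₀ h0 (hlt' i₀ List.mem_cons_self)
        (hmin' i₀ List.mem_cons_self)

-- ===== VERDICT =====
theorem solution_585_3_spec : Claim_equal_solution_585_3 := by
  intro s k _
  unfold Spec_solution_585_3 solution_585_3 solution_585_3_alt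
  by_cases hk : k == 1
  · simp only [hk, Bool.not_true, if_true, Bool.false_eq_true, if_false]
    have h := pvMain s.toList
    by_cases h0 : s.toList.length == 0
    · rw [if_pos h0] at h
      rw [if_pos h0, h]
    · rw [if_neg h0] at h
      rw [if_neg h0, h]
  · simp only [hk, Bool.not_false, Bool.false_eq_true, if_false, if_true]
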